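-- pv_equiv track=rewrite | github.com/no135/Computer_Security | AES.py | gmul
-- ===== SOURCE A (Python) =====
-- def gmul(a, b):
--     """
--     Multiplies two numbers in the Galois Field (GF(2^8)).
--     This ensures the result remains within the range of a single byte (0-255)
--     without overflowing.
--     """
--     p = 0
--     for _ in range(8):
--         if b & 1: p ^= a
--         hi = a & 0x80
--         a = (a << 1) & 0xFF
--         if hi: a ^= 0x1B # Irreducible polynomial used in AES
--         b >>= 1
--     return p
-- ===== SOURCE B (Python) =====
-- def xtime(x):
--     """Multiply by x (i.e. 2) in GF(2^8): shift left, reduce by 0x1B on overflow."""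
--     return ((x << 1) & 0xFF) ^ (0x1B if x & 0x80 else 0)
--
-- def gmul(a, b):
--     # Phase 1: precompute the table of the 8 successive GF doublings of a.
--     doubles = [a]
--     d = a
--     for _ in range(7):
--         d = xtime(d)
--         doubles.append(d)
--     # Phase 2: XOR together the doublings selected by the low 8 bits of b.
--     p = 0
--     for i, d in enumerate(doubles):
--         if (b >> i) & 1:
--             p ^= d
--     return p
-- ===== Notes on version B (the rewrite author's own statement) =====
-- stated objective: alternative
-- what changed: A interleaves conditional XOR, doubling of a and halving of b in one 8-step loop over mutable state; B splits the work into two phases — it first precomputes the table of the 8 successive GF(2^8) doublings of a, then XORs together the table entries selected by the low 8 bits of b via indexed bit tests (b >> i) & 1.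
import Mathlib
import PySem

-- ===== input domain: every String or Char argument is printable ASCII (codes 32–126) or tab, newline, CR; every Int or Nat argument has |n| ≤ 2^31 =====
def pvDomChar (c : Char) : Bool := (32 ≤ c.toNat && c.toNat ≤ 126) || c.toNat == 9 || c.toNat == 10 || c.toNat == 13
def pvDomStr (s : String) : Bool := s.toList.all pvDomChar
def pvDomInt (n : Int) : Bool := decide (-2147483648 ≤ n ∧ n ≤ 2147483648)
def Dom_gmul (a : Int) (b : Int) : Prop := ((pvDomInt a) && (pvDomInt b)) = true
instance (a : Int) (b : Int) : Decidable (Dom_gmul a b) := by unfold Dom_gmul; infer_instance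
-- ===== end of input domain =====

-- B restructures A's interleaved shift-and-add loop into two phases — precompute the table of
-- the 8 GF doublings of a, then XOR the entries selected by b's low bits (objective: alternative).

-- ===== PORT A =====
def gmul (a : Int) (b : Int) : Int :=
  ((PySem.List.pyRange 0 8 1).foldl
    (fun (st : Int × Int × Int) _ =>
      let p := if PySem.Int.band st.2.2 1 ≠ 0 then PySem.Int.bxor st.1 st.2.1 else st.1
      let hi := PySem.Int.band st.2.1 0x80
      let a1 := PySem.Int.band (st.2.1 <<< 1) 0xFF
      let a2 := if hi ≠ 0 then PySem.Int.bxor a1 0x1B else a1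
      (p, a2, st.2.2 >>> (1 : Nat)))
    (0, a, b)).1

-- ===== PORT B =====
def xtime (x : Int) : Int :=
  PySem.Int.bxor (PySem.Int.band (x <<< 1) 0xFF)
    (if PySem.Int.band x 0x80 ≠ 0 then 0x1B else 0)

def gmul_alt (a : Int) (b : Int) : Int :=
  -- Phase 1: table of the 8 successive GF doublings of a
  let st := (PySem.List.pyRange 0 7 1).foldl
    (fun (st : List Int × Int) _ =>
      let d := xtime st.2
      (st.1 ++ [d], d))
    ([a], a)
  -- Phase 2: XOR together the doublings selected by the low 8 bits of b
  (PySem.List.enumerate st.1 0).foldl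
    (fun p (id : Int × Int) =>
      if PySem.Int.band (b >>> id.1.toNat) 1 ≠ 0 then PySem.Int.bxor p id.2 else p)
    0

-- ===== PRECONDITION & SPEC =====
def Spec_gmul (a : Int) (b : Int) (out : Int) : Prop := out = gmul_alt a b
instance (a : Int) (b : Int) (out : Int) : Decidable (Spec_gmul a b out) := by unfold Spec_gmul; infer_instance

-- ===== CLAIM (what is proved, stated in full; the proofs are below) =====
def Claim_equal_gmul : Prop := ∀ (a : Int) (b : Int), Dom_gmul a b → Spec_gmul a b (gmul a b)

-- ===== LEMMAS AND PROOFS =====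

-- the list [a, xtime a, xtime (xtime a), …] of length n
def dbl (a : Int) : Nat → List Int
  | 0 => []
  | n + 1 => a :: dbl (xtime a) n

-- fold "xor d into p when the current low bit of b is set, then halve b" over a list of doublings
def g (p : Int) : List Int → Int → Int
  | [], _ => p
  | d :: ds, b => g (if PySem.Int.band b 1 ≠ 0 then PySem.Int.bxor p d else p) ds (b >>> (1 : Nat))

theorem aupdate_eq_xtime (a : Int) :
    (if PySem.Int.band a 0x80 ≠ 0
      then PySem.Int.bxor (PySem.Int.band (a <<< 1) 0xFF) 0x1B
      else PySem.Int.band (a <<< 1) 0xFF) = xtime a := by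
  unfold xtime
  by_cases h : PySem.Int.band a 0x80 = 0 <;> simp [h, PySem.Int.bxor_zero]

theorem A_loop (l : List Int) (p a b : Int) :
    (l.foldl
      (fun (st : Int × Int × Int) _ =>
        let p := if PySem.Int.band st.2.2 1 ≠ 0 then PySem.Int.bxor st.1 st.2.1 else st.1
        let hi := PySem.Int.band st.2.1 0x80
        let a1 := PySem.Int.band (st.2.1 <<< 1) 0xFF
        let a2 := if hi ≠ 0 then PySem.Int.bxor a1 0x1B else a1
        (p, a2, st.2.2 >>> (1 : Nat)))
      (p, a, b)).1 = g p (dbl a l.length) b := by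
  induction l generalizing p a b with
  | nil => rfl
  | cons x xs ih =>
      simp only [List.foldl_cons, List.length_cons, dbl, g]
      rw [← aupdate_eq_xtime a]
      exact ih _ _ _

theorem B_phase1 (l : List Int) (acc : List Int) (d : Int) :
    l.foldl
      (fun (st : List Int × Int) _ =>
        let d := xtime st.2
        (st.1 ++ [d], d))
      (acc ++ [d], d) = (acc ++ dbl d (l.length + 1), xtime^[l.length] d) := by
  induction l generalizing acc d with
  | nil => simp [dbl]
  | cons x xs ih =>
      simp only [List.foldl_cons, List.length_cons]
      rw [ih (acc ++ [d]) (xtime d)]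
      simp [dbl, Function.iterate_succ_apply, List.append_assoc]

theorem B_phase2 (b : Int) (ds : List Int) (p : Int) (k : Nat) :
    (PySem.List.enumerate ds (k : Int)).foldl
      (fun p (id : Int × Int) =>
        if PySem.Int.band (b >>> id.1.toNat) 1 ≠ 0 then PySem.Int.bxor p id.2 else p)
      p = g p ds (b >>> k) := by
  induction ds generalizing p k with
  | nil => rfl
  | cons d ds ih =>
      rw [PySem.List.enumerate_cons, List.foldl_cons]
      simp only [Int.toNat_natCast, g]
      have hk : ((k : Int) + 1) = ((k + 1 : Nat) : Int) := by push_cast; ring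
      rw [hk, ih _ (k + 1)]
      have : (b >>> k) >>> (1 : Nat) = b >>> (k + 1) := by
        simp [Int.shiftRight_add]
      rw [← this]

-- ===== VERDICT (by name: the statement is the Claim_ definition above) =====
theorem gmul_spec : Claim_equal_gmul := by
  intro a b _
  show gmul a b = gmul_alt a b
  have hA : gmul a b = g 0 (dbl a 8) b := by
    unfold gmul
    rw [show PySem.List.pyRange 0 8 1 = [0,1,2,3,4,5,6,7] from by decide]
    exact A_loop [0,1,2,3,4,5,6,7] 0 a b
  have hB : gmul_alt a b = g 0 (dbl a 8) b := by
    unfold gmul_alt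
    rw [show PySem.List.pyRange 0 7 1 = [0,1,2,3,4,5,6] from by decide]
    rw [show ([a], a) = (([] : List Int) ++ [a], a) from by simp]
    rw [B_phase1 [0,1,2,3,4,5,6] [] a]
    simpa using B_phase2 b (dbl a 8) 0 0
  rw [hA, hB]
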